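-- pv_equiv track=rewrite | github.com/pypi-data/pypi-mirror-31 | packages/acrilib/acrilib-1.0.8.tar.gz/acrilib-1.0.8/acrilib/setup/install_required.py | format_setup_required
-- ===== SOURCE A (Python) =====
-- def format_setup_required(required, ident=''):
--     items = []
--     prefix = '{}install_required = ['.format(ident)
--     plen = len(prefix) + len(ident)
--     for item in required:
--         items += ["{}'{}',".format(prefix, item)]
--         prefix = ' ' * plen
--     items += [']']
--     return '\n'.join(items)
-- ===== SOURCE B (Python) =====
-- def format_setup_required(required, ident=''):
--     if not required:
--         return ']'
--     prefix = '{}install_required = ['.format(ident)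
--     pad = ' ' * (len(prefix) + len(ident))
--     sep = "',\n" + pad + "'"
--     return prefix + "'" + sep.join(required) + "',\n]"
-- ===== Notes on version B (the rewrite author's own statement) =====
-- stated objective: simpler
-- what changed: Replaces A's loop that accumulates a line list while overwriting the prefix with spaces after each item by a direct construction: quote the items and emit them with a single join over a computed ',\n<pad>' separator (empty list still yields ']').
import Mathlib
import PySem

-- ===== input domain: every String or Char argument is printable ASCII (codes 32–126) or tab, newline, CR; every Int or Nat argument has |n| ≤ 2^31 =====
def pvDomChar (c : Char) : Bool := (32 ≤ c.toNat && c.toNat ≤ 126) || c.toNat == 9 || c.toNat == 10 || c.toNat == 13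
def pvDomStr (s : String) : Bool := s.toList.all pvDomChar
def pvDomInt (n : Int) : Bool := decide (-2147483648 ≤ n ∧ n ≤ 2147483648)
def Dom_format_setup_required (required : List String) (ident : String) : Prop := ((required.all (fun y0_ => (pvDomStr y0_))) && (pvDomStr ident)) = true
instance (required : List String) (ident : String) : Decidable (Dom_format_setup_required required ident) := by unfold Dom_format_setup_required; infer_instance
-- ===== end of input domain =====

-- B replaces A's mutating-prefix accumulation loop with one join over a computed separator (objective: simpler).

-- ===== PORT A =====
-- A's loop: items accumulated line by line, prefix overwritten with spaces after each item.
def format_setup_required (required : List String) (ident : String) : String :=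
  let pre : List Char := ident.toList ++ ("install_required = [").toList
  let plen : Nat := pre.length + ident.toList.length
  let st := required.foldl
    (fun (s : List (List Char) × List Char) item =>
      (s.1 ++ [s.2 ++ '\'' :: item.toList ++ ['\'', ',']], List.replicate plen ' '))
    (([] : List (List Char)), pre)
  String.ofList (PySem.Chars.join ['\n'] (st.1 ++ [[']']]))

-- ===== PORT B =====
def format_setup_required_alt (required : List String) (ident : String) : String :=
  match required with
  | [] => "]"
  | _ :: _ =>
    let pre : List Char := ident.toList ++ ("install_required = [").toList
    let pad : List Char := List.replicate (pre.length + ident.toList.length) ' '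
    let sep : List Char := '\'' :: ',' :: '\n' :: (pad ++ ['\''])
    String.ofList (pre ++ ['\''] ++ PySem.Chars.join sep (required.map String.toList)
      ++ ['\'', ',', '\n', ']'])

-- ===== PRECONDITION & SPEC =====
def Spec_format_setup_required (required : List String) (ident : String) (out : String) : Prop := out = format_setup_required_alt required ident
instance (required : List String) (ident : String) (out : String) : Decidable (Spec_format_setup_required required ident out) := by unfold Spec_format_setup_required; infer_instance

-- ===== CLAIM (what is proved, stated in full; the proofs are below) =====
def Claim_equal_format_setup_required : Prop := ∀ (required : List String) (ident : String), Dom_format_setup_required required ident → Spec_format_setup_required required ident (format_setup_required required ident)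

-- ===== LEMMAS AND PROOFS =====

-- a quoted item line body: 'item',
def pvQuote (item : String) : List Char := '\'' :: item.toList ++ ['\'', ',']

-- A's loop produces the first line with prefix p, the rest with the pad.
theorem pvLoopLines (xs : List String) (pad : List Char) :
    ∀ (acc : List (List Char)) (p : List Char),
    (xs.foldl (fun (s : List (List Char) × List Char) item =>
        (s.1 ++ [s.2 ++ pvQuote item], pad)) (acc, p)).1
      = acc ++ (match xs with
                | [] => []
                | x :: r => (p ++ pvQuote x) :: r.map (fun y => pad ++ pvQuote y)) := by
  induction xs with
  | nil => intro acc p; simp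
  | cons x r ih =>
    intro acc p
    simp only [List.foldl_cons]
    rw [ih]
    cases r <;> simp

-- joining the lines with '\n' equals B's single join with the computed separator
theorem pvJoinKey (pad : List Char) (r : List (List Char)) :
    ∀ (p x : List Char),
    PySem.Chars.join ['\n'] ((p ++ ('\'' :: (x ++ ['\'', ',']))) :: (r.map (fun y => pad ++ ('\'' :: (y ++ ['\'', ',']))) ++ [[']']]))
      = p ++ ['\''] ++ PySem.Chars.join ('\'' :: ',' :: '\n' :: (pad ++ ['\''])) (x :: r) ++ ['\'', ',', '\n', ']'] := by
  induction r with
  | nil =>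
    intro p x
    simp [PySem.Chars.join_cons_cons, PySem.Chars.join_singleton]
  | cons y t ih =>
    intro p x
    simp only [List.map_cons, List.cons_append]
    rw [PySem.Chars.join_cons_cons, ih pad y, PySem.Chars.join_cons_cons]
    simp

-- pvJoinKey specialised to string items (what the verdict proof meets after pvLoopLines)
theorem pvFinal (pre pad : List Char) (x : String) (r : List String) :
    PySem.Chars.join ['\n'] ((pre ++ pvQuote x) :: r.map (fun y => pad ++ pvQuote y) ++ [[']']])
      = pre ++ ['\''] ++ PySem.Chars.join ('\'' :: ',' :: '\n' :: (pad ++ ['\''])) (x.toList :: r.map String.toList) ++ ['\'', ',', '\n', ']'] := by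
  have hmap : r.map (fun y => pad ++ pvQuote y)
      = (r.map String.toList).map (fun y => pad ++ ('\'' :: (y ++ ['\'', ',']))) := by
    simp [List.map_map, pvQuote, Function.comp]
  rw [hmap, show pvQuote x = '\'' :: (x.toList ++ ['\'', ',']) from by simp [pvQuote], List.cons_append, pvJoinKey]

-- ===== VERDICT (by name: the statement is the Claim_ definition above) =====
theorem format_setup_required_spec : Claim_equal_format_setup_required := by
  intro required ident _
  unfold Spec_format_setup_required format_setup_required format_setup_required_alt
  cases required with
  | nil => simp [PySem.Chars.join_singleton]
  | cons x r =>
    simp only []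
    rw [show (fun (s : List (List Char) × List Char) item =>
          (s.1 ++ [s.2 ++ '\'' :: item.toList ++ ['\'', ',']],
            List.replicate (((ident.toList ++ ("install_required = [").toList)).length + ident.toList.length) ' '))
        = (fun (s : List (List Char) × List Char) item => (s.1 ++ [s.2 ++ pvQuote item],
            List.replicate (((ident.toList ++ ("install_required = [").toList)).length + ident.toList.length) ' ')) from by
      funext s item; simp [pvQuote]]
    rw [pvLoopLines (x :: r) _ [] _]
    simp only [List.nil_append]
    rw [pvFinal]
    simp
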